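-- pv_equiv track=rewrite | github.com/weirdname404/courses | math_thinking/15puzzle.py | count_transpositions
-- ===== SOURCE A (Python) =====
-- def count_transpositions(p, c):
--
--     if len(p) <= 1:
--         return p, c
--
--     min_v = min(p)
--     min_vi = p.index(min_v)
--
--     if p[0] != min_v:
--         # swap
--         tmp = p[0]
--         p[0] = min_v
--         p[min_vi] = tmp
--         c += 1
--
--     res, c = count_transpositions(p[1:], c)
--
--     return [min_v] + res, c
-- ===== SOURCE B (Python) =====
-- def count_transpositions(p, c):
--     arr = list(p)
--     s = sorted(arr)
--     pos = {v: i for i, v in enumerate(arr)}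
--     for i, v in enumerate(s):
--         u = arr[i]
--         if u != v:
--             j = pos[v]
--             arr[i] = v
--             arr[j] = u
--             pos[u] = j
--             pos[v] = i
--             c += 1
--     return arr, c
-- ===== Notes on version B (the rewrite author's own statement) =====
-- stated objective: alternative
-- what changed: Replaces the recursive selection-by-min pass (each level rescans the suffix with min() and .index() and copies it with slicing) by one sort up front plus a single in-place pass that uses a value-to-index dictionary to place each sorted element with at most one swap; on the distinct-valued domain this is O(n log n) vs A's O(n^2), but a timing run's large inputs contain duplicates and lie outside Pre_, so no speed is claimed. …
-- outside the precondition, e.g. on count_transpositions([0, 2, 0, 0], 0): A returns ([0, 0, 0, 2], 2), B returns ([0, 0, 0, 2], 1)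
import Mathlib
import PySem

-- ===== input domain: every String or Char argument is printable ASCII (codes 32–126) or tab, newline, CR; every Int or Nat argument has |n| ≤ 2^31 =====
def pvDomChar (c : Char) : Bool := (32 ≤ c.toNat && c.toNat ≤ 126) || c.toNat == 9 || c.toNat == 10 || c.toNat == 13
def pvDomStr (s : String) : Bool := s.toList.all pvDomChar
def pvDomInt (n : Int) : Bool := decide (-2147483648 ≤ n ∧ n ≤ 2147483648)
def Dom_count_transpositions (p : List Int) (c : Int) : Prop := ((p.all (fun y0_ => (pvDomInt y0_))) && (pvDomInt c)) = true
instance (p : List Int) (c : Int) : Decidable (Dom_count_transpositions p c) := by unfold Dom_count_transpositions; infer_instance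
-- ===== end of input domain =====

-- B replaces A's recursive min()/.index()/slicing selection pass by one sort plus a single
-- dictionary-indexed placement pass (a different algorithm); equivalence is about the RETURN
-- value only: A swaps two cells of the caller's list in place, B leaves its argument untouched.

-- ===== PORT A =====
def count_transpositions (p : List Int) (c : Int) : List Int × Int :=
  if p.length ≤ 1 then (p, c)
  else
    -- p is nonempty here, so min? is some and index? is some: the getD defaults are unreachable
    let min_v := (PySem.List.min? p (fun x => x)).getD 0
    let min_vi := (PySem.List.index? p min_v).getD 0
    let pc :=
      if PySem.List.pyGetD p 0 0 ≠ min_v then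
        let tmp := PySem.List.pyGetD p 0 0
        (PySem.List.pySetD (PySem.List.pySetD p 0 min_v) (min_vi : Int) tmp, c + 1)
      else (p, c)
    let r := count_transpositions (PySem.List.slice pc.1 (some 1) none) pc.2
    (min_v :: r.1, r.2)
termination_by p.length
decreasing_by
  simp only [PySem.List.slice_from _ (by omega : (0:Int) ≤ 1)]
  split <;> simp [PySem.List.length_pySetD] <;> omega

-- ===== PORT B =====
-- loop body of B's single pass: iv = (i, v) from enumerate(s); state = (arr, pos, c)
def bstep (st : List Int × PySem.Dict Int Int × Int) (iv : Int × Int) :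
    List Int × PySem.Dict Int Int × Int :=
  let arr := st.1
  let pos := st.2.1
  let c := st.2.2
  let i := iv.1
  let v := iv.2
  let u := PySem.List.pyGetD arr i 0
  if u ≠ v then
    let j := pos.getD v 0
    (PySem.List.pySetD (PySem.List.pySetD arr i v) j u,
     (pos.insert u j).insert v i, c + 1)
  else st

def count_transpositions_alt (p : List Int) (c : Int) : List Int × Int :=
  let arr := p
  let s := PySem.List.sorted arr (fun x => x) false
  let pos := (PySem.List.enumerate arr 0).foldl (fun d iv => d.insert iv.2 iv.1) PySem.Dict.empty
  let st := (PySem.List.enumerate s 0).foldl bstep (arr, pos, c)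
  (st.1, st.2.2)

-- ===== PRECONDITION & SPEC =====
-- Pre_ excludes lists with duplicate values: there the choice of which equal occurrence to move
-- is an unspecified tie (A's .index() picks the first, B's dictionary keeps the last; both are
-- defensible and on many such inputs the counts still coincide); the function's 15-puzzle
-- domain is permutations (distinct values).
def Pre_count_transpositions (p : List Int) (c : Int) : Prop := p.Nodup
instance (p : List Int) (c : Int) : Decidable (Pre_count_transpositions p c) := by
  unfold Pre_count_transpositions; infer_instance
def pvWitness_count_transpositions : List Int × Int := ([3, 1, 2], 0)

def Spec_count_transpositions (p : List Int) (c : Int) (out : List Int × Int) : Prop := out = count_transpositions_alt p c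
instance (p : List Int) (c : Int) (out : List Int × Int) : Decidable (Spec_count_transpositions p c out) := by unfold Spec_count_transpositions; infer_instance

-- ===== CLAIM (what is proved, stated in full; the proofs are below) =====
def Claim_equal_count_transpositions : Prop := ∀ (p : List Int) (c : Int), Dom_count_transpositions p c → Pre_count_transpositions p c → Spec_count_transpositions p c (count_transpositions p c)

-- ===== LEMMAS AND PROOFS =====

-- pos is a correct value-to-index dictionary for the list `full`
def PosOK (pos : PySem.Dict Int Int) (full : List Int) : Prop :=
  ∀ v ∈ full, pos.getD v 0 = (full.idxOf v : Int)

theorem idxOf?_eq_some_of_mem (l : List Int) (a : Int) (hm : a ∈ l) :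
    List.idxOf? a l = some (l.idxOf a) := by
  induction l with
  | nil => cases hm
  | cons x t ih =>
    by_cases hx : x = a
    · subst hx; simp [List.idxOf?_cons, List.idxOf_cons_self]
    · rcases List.mem_cons.mp hm with h | h
      · exact absurd h.symm hx
      · simp [List.idxOf?_cons, List.idxOf_cons_ne _ hx, hx, ih h]

theorem min?_isSome_cons (x : Int) (t : List Int) :
    ∃ m, PySem.List.min? (x :: t) (fun y : Int => y) = some m := by
  induction t generalizing x with
  | nil => exact ⟨x, rfl⟩
  | cons y t ih => simp only [PySem.List.min?, List.foldl_cons] at *; split <;> exact ih _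

theorem sorted_cons_min (m : Int) (t : List Int) (hnd : (m :: t).Nodup)
    (hmin : ∀ z ∈ t, m ≤ z) :
    PySem.List.sorted (m :: t) (fun y : Int => y) false
      = m :: PySem.List.sorted t (fun y : Int => y) false := by
  apply PySem.List.sorted_eq_of_perm_of_pairwise_lt
  · exact (PySem.List.sorted_perm t _ false).cons m
  · constructor
    · intro z hz
      have hzt : z ∈ t := (PySem.List.mem_sorted _ _ _ _).1 hz
      have hne : m ≠ z := fun h => (List.nodup_cons.1 hnd).1 (h ▸ hzt)
      exact lt_of_le_of_ne (hmin z hzt) hne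
    · have h1 := PySem.List.sorted_pairwise t (fun y : Int => y)
      have h2 : (PySem.List.sorted t (fun y : Int => y) false).Nodup :=
        (PySem.List.sorted_perm t _ false).nodup_iff.2 (List.nodup_cons.1 hnd).2
      exact (h1.and h2).imp (fun h => lt_of_le_of_ne h.1 h.2)

theorem foldInsert_not_mem (l : List Int) : ∀ (k : Int) (d : PySem.Dict Int Int) (v : Int),
    v ∉ l →
    ((PySem.List.enumerate l k).foldl (fun d iv => d.insert iv.2 iv.1) d).getD v 0
      = d.getD v 0 := by
  induction l with
  | nil => intro k d v _; rfl
  | cons x t ih =>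
    intro k d v hv
    have hvx : v ≠ x := fun h => hv (h ▸ List.mem_cons_self)
    have hvt : v ∉ t := fun h => hv (List.mem_cons_of_mem _ h)
    show ((PySem.List.enumerate t (k + 1)).foldl _ (d.insert x k)).getD v 0 = _
    rw [ih (k + 1) _ v hvt, PySem.Dict.getD_insert]
    simp [hvx]

theorem foldInsert_mem (l : List Int) : ∀ (k : Int) (d : PySem.Dict Int Int) (v : Int),
    l.Nodup → v ∈ l →
    ((PySem.List.enumerate l k).foldl (fun d iv => d.insert iv.2 iv.1) d).getD v 0
      = k + (l.idxOf v : Int) := by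
  induction l with
  | nil => intro _ _ _ _ hv; cases hv
  | cons x t ih =>
    intro k d v hnd hv
    by_cases hvx : v = x
    · subst hvx
      show ((PySem.List.enumerate t (k + 1)).foldl _ (d.insert v k)).getD v 0 = _
      rw [foldInsert_not_mem t (k + 1) _ v (List.nodup_cons.1 hnd).1,
        PySem.Dict.getD_insert]
      simp [List.idxOf_cons_self]
    · have hvt : v ∈ t := (List.mem_cons.1 hv).resolve_left hvx
      show ((PySem.List.enumerate t (k + 1)).foldl _ (d.insert x k)).getD v 0 = _
      rw [ih (k + 1) _ v (List.nodup_cons.1 hnd).2 hvt,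
        List.idxOf_cons_ne _ (fun h => hvx h.symm)]
      push_cast
      ring

theorem bstep_skip (arr : List Int) (pos : PySem.Dict Int Int) (c i v : Int)
    (h : PySem.List.pyGetD arr i 0 = v) : bstep (arr, pos, c) (i, v) = (arr, pos, c) := by
  simp [bstep, h]

theorem bstep_swap (arr : List Int) (pos : PySem.Dict Int Int) (c i v : Int)
    (h : PySem.List.pyGetD arr i 0 ≠ v) :
    bstep (arr, pos, c) (i, v) =
      (PySem.List.pySetD (PySem.List.pySetD arr i v) (pos.getD v 0) (PySem.List.pyGetD arr i 0),
       (pos.insert (PySem.List.pyGetD arr i 0) (pos.getD v 0)).insert v i, c + 1) := by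
  simp [bstep, h]

theorem A_nil (c : Int) : count_transpositions [] c = ([], c) := by
  rw [count_transpositions]; simp

theorem A_one (x c : Int) : count_transpositions [x] c = ([x], c) := by
  rw [count_transpositions]; simp

theorem A_noswap (x : Int) (r : List Int) (c : Int) (hr : r ≠ [])
    (hm : (PySem.List.min? (x :: r) (fun z : Int => z)).getD 0 = x) :
    count_transpositions (x :: r) c =
      (x :: (count_transpositions r c).1, (count_transpositions r c).2) := by
  conv_lhs => rw [count_transpositions]
  simp [hm, PySem.List.pyGetD_zero_cons, PySem.List.slice_from _ (by omega : (0:Int) ≤ 1)]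
  intro h
  exact absurd h hr

theorem A_swap (x : Int) (r : List Int) (c m : Int) (k : Nat) (hr : r ≠ [])
    (hm : (PySem.List.min? (x :: r) (fun z : Int => z)).getD 0 = m)
    (hne : x ≠ m)
    (hidx : (PySem.List.index? (x :: r) m).getD 0 = k) :
    count_transpositions (x :: r) c =
      (m :: (count_transpositions
               ((PySem.List.pySetD (PySem.List.pySetD (x :: r) 0 m) (k : Int) x).drop 1)
               (c + 1)).1,
       (count_transpositions
               ((PySem.List.pySetD (PySem.List.pySetD (x :: r) 0 m) (k : Int) x).drop 1)
               (c + 1)).2) := by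
  rw [PySem.List.index?_eq_idxOf?] at hidx
  conv_lhs => rw [count_transpositions]
  simp [hm, hidx, hne, PySem.List.pyGetD_zero_cons,
    PySem.List.slice_from _ (by omega : (0:Int) ≤ 1)]
  exact hr

theorem main_loop (n : Nat) : ∀ (q pre : List Int) (pos : PySem.Dict Int Int) (c : Int),
    q.length = n → (pre ++ q).Nodup → PosOK pos (pre ++ q) →
    ((PySem.List.enumerate (PySem.List.sorted q (fun x => x) false) (pre.length : Int)).foldl
        bstep (pre ++ q, pos, c)).1 = pre ++ (count_transpositions q c).1 ∧
    ((PySem.List.enumerate (PySem.List.sorted q (fun x => x) false) (pre.length : Int)).foldl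
        bstep (pre ++ q, pos, c)).2.2 = (count_transpositions q c).2 := by
  induction n using Nat.strong_induction_on with
  | _ n ih =>
    intro q pre pos c hn hnd hpos
    match q with
    | [] =>
      rw [show PySem.List.sorted ([] : List Int) (fun x => x) false = [] from rfl]
      simp [PySem.List.enumerate, A_nil]
    | [x] =>
      rw [show PySem.List.sorted [x] (fun x : Int => x) false = [x] from rfl]
      rw [show PySem.List.enumerate [x] (pre.length : Int) = [((pre.length : Int), x)] from rfl]
      have hget : PySem.List.pyGetD (pre ++ [x]) (pre.length : Int) 0 = x := by
        simp [PySem.List.pyGetD_natCast]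
      simp [bstep_skip _ _ _ _ _ hget, A_one]
    | x :: y :: t' =>
      have hqnd : (x :: y :: t').Nodup := hnd.of_append_right
      obtain ⟨m, s', hs⟩ : ∃ m s',
          PySem.List.sorted (x :: y :: t') (fun z : Int => z) false = m :: s' := by
        cases hsort : PySem.List.sorted (x :: y :: t') (fun z : Int => z) false with
        | nil =>
          have := (PySem.List.sorted_perm (x :: y :: t') (fun z : Int => z) false).length_eq
          rw [hsort] at this
          simp at this
        | cons a b => exact ⟨a, b, rfl⟩
      have hmle : ∀ z ∈ (x :: y :: t'), m ≤ z :=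
        PySem.List.key_head_sorted_le _ _ hs
      have hmmem : m ∈ (x :: y :: t') :=
        ((PySem.List.sorted_perm _ _ false).mem_iff).1 (hs ▸ List.mem_cons_self)
      have hmins : (PySem.List.min? (x :: y :: t') (fun z : Int => z)).getD 0 = m := by
        obtain ⟨m', hm'⟩ := min?_isSome_cons x (y :: t')
        have h1 := PySem.List.min?_isMin hm' m hmmem
        have h2 := hmle m' (PySem.List.min?_mem hm')
        rw [hm', Option.getD_some]
        exact le_antisymm h1 h2
      by_cases hxm : x = m
      · -- head already minimal: no swap
        subst hxm
        have hscons : PySem.List.sorted (x :: y :: t') (fun z : Int => z) false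
            = x :: PySem.List.sorted (y :: t') (fun z : Int => z) false :=
          sorted_cons_min x (y :: t') hqnd (fun z hz => hmle z (List.mem_cons_of_mem _ hz))
        have hs' : s' = PySem.List.sorted (y :: t') (fun z : Int => z) false := by
          rw [hscons] at hs
          exact (List.cons_eq_cons.1 hs.symm).2
        have hget : PySem.List.pyGetD (pre ++ x :: y :: t') (pre.length : Int) 0 = x := by
          simp [PySem.List.pyGetD_natCast]
        have harr : pre ++ x :: y :: t' = (pre ++ [x]) ++ (y :: t') := by simp
        have hlen1 : (y :: t').length = n - 1 := by
          simp only [List.length_cons] at hn ⊢; omega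
        have hn1 : 1 ≤ n := by
          simp only [List.length_cons] at hn; omega
        have IH := ih (n - 1) (by omega) (y :: t') (pre ++ [x]) pos c hlen1
          (by rw [← harr]; exact hnd) (by rw [← harr]; exact hpos)
        rw [hs]
        rw [show PySem.List.enumerate (x :: s') (pre.length : Int)
              = ((pre.length : Int), x) :: PySem.List.enumerate s' ((pre.length : Int) + 1) from rfl]
        rw [List.foldl_cons, bstep_skip _ _ _ _ _ hget]
        rw [A_noswap x (y :: t') c (by simp) hmins]
        have hlen' : ((pre ++ [x]).length : Int) = (pre.length : Int) + 1 := by simp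
        rw [← harr, ← hs', hlen'] at IH
        refine ⟨IH.1.trans ?_, IH.2⟩
        simp
      · -- swap case: decompose q = x :: t₁ ++ m :: q₂ at the (unique) position of m
        obtain ⟨q₁, q₂, hq⟩ := List.append_of_mem hmmem
        cases q₁ with
        | nil =>
          exact absurd (List.cons_eq_cons.1 hq).1 hxm
        | cons x' t₁ =>
          obtain ⟨hx', hT⟩ := List.cons_eq_cons.1 hq
          subst hx'
          simp only [List.append_eq] at hT
          rw [hT] at hqnd hmle hmins hmmem hs hnd hpos hn ⊢
          -- non-membership facts from Nodup
          have hdisj : ∀ a ∈ pre, a ∈ x :: (t₁ ++ m :: q₂) → False :=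
            fun a ha ha' => (List.disjoint_of_nodup_append hnd) ha ha'
          have hmpre : m ∉ pre := fun h =>
            hdisj m h (List.mem_cons_of_mem _ (List.mem_append_right _ List.mem_cons_self))
          have hxpre : x ∉ pre := fun h => hdisj x h List.mem_cons_self
          have hxT : x ∉ t₁ ++ m :: q₂ := (List.nodup_cons.1 hqnd).1
          have hTnd : (t₁ ++ m :: q₂).Nodup := (List.nodup_cons.1 hqnd).2
          have hxt₁ : x ∉ t₁ := fun h => hxT (List.mem_append_left _ h)
          have hxq₂ : x ∉ q₂ := fun h =>
            hxT (List.mem_append_right _ (List.mem_cons_of_mem _ h))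
          have hmt₁ : m ∉ t₁ := fun h =>
            (List.disjoint_of_nodup_append hTnd) h List.mem_cons_self
          have hmq₂ : m ∉ q₂ := (List.nodup_cons.1 hTnd.of_append_right).1
          have ht₁q₂ : ∀ a ∈ t₁, a ∉ q₂ := fun a ha h =>
            (List.disjoint_of_nodup_append hTnd) ha (List.mem_cons_of_mem _ h)
          -- the permuted tail after the swap
          have hidx : (PySem.List.index? (x :: (t₁ ++ m :: q₂)) m).getD 0 = t₁.length + 1 := by
            simp only [PySem.List.index?_eq_idxOf?, idxOf?_eq_some_of_mem _ _ hmmem,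
              Option.getD_some]
            rw [List.idxOf_cons_ne _ hxm, List.idxOf_append_of_notMem hmt₁, List.idxOf_cons_self]
          have hset : (PySem.List.pySetD (PySem.List.pySetD (x :: (t₁ ++ m :: q₂)) 0 m)
              ((t₁.length + 1 : Nat) : Int) x).drop 1 = t₁ ++ x :: q₂ := by
            rw [show PySem.List.pySetD (x :: (t₁ ++ m :: q₂)) 0 m = m :: (t₁ ++ m :: q₂) from by
              rw [PySem.List.pySetD_of_nonneg (h := by omega)]; rfl]
            rw [PySem.List.pySetD_natCast]
            rw [show (t₁.length + 1) = (m :: t₁).length from by simp]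
            rw [show m :: (t₁ ++ m :: q₂) = (m :: t₁) ++ m :: q₂ from rfl]
            rw [show ((m :: t₁) ++ m :: q₂).set (m :: t₁).length x = (m :: t₁) ++ x :: q₂ from by simp]
            simp
          have hA := A_swap x (t₁ ++ m :: q₂) c m (t₁.length + 1) (by simp) hmins hxm hidx
          rw [hset] at hA
          -- B side: first loop iteration swaps x with m
          rw [hs]
          rw [show PySem.List.enumerate (m :: s') (pre.length : Int)
                = ((pre.length : Int), m) :: PySem.List.enumerate s' ((pre.length : Int) + 1) from rfl]
          rw [List.foldl_cons]
          have hget : PySem.List.pyGetD (pre ++ x :: (t₁ ++ m :: q₂)) (pre.length : Int) 0 = x := by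
            simp [PySem.List.pyGetD_natCast]
          rw [bstep_swap _ _ _ _ _ (by rw [hget]; exact hxm)]
          rw [hget]
          have hj : pos.getD m 0 = ((pre.length + (t₁.length + 1) : Nat) : Int) := by
            rw [hpos m (List.mem_append_right _ hmmem)]
            congr 1
            rw [List.idxOf_append_of_notMem hmpre, List.idxOf_cons_ne _ hxm,
              List.idxOf_append_of_notMem hmt₁, List.idxOf_cons_self]
          rw [hj]
          have harr : PySem.List.pySetD (PySem.List.pySetD (pre ++ x :: (t₁ ++ m :: q₂))
                (pre.length : Int) m) (((pre.length + (t₁.length + 1) : Nat)) : Int) x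
              = pre ++ m :: (t₁ ++ x :: q₂) := by
            rw [PySem.List.pySetD_natCast, PySem.List.pySetD_natCast]
            rw [show (pre ++ x :: (t₁ ++ m :: q₂)).set pre.length m
                  = pre ++ m :: (t₁ ++ m :: q₂) from by simp]
            rw [show pre ++ m :: (t₁ ++ m :: q₂) = (pre ++ m :: t₁) ++ m :: q₂ from by simp]
            rw [show pre.length + (t₁.length + 1) = (pre ++ m :: t₁).length from by simp]
            rw [show ((pre ++ m :: t₁) ++ m :: q₂).set (pre ++ m :: t₁).length x
                  = (pre ++ m :: t₁) ++ x :: q₂ from by simp]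
            simp
          rw [harr]
          -- the swap is a permutation; Nodup and sortedness carry over
          have hperm : (x :: (t₁ ++ m :: q₂)).Perm (m :: (t₁ ++ x :: q₂)) :=
            (List.perm_middle.cons x).trans
              ((List.Perm.swap m x (t₁ ++ q₂)).trans (List.perm_middle.symm.cons m))
          have hpermfull : (pre ++ x :: (t₁ ++ m :: q₂)).Perm (pre ++ m :: (t₁ ++ x :: q₂)) :=
            List.Perm.append_left pre hperm
          have hnd2 : (pre ++ m :: (t₁ ++ x :: q₂)).Nodup := hpermfull.nodup_iff.1 hnd
          have hscons2 : PySem.List.sorted (m :: (t₁ ++ x :: q₂)) (fun z : Int => z) false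
              = m :: PySem.List.sorted (t₁ ++ x :: q₂) (fun z : Int => z) false := by
            apply sorted_cons_min
            · exact hnd2.of_append_right
            · intro z hz
              exact hmle z (hperm.symm.subset (List.mem_cons_of_mem _ hz))
          have hs2 : s' = PySem.List.sorted (t₁ ++ x :: q₂) (fun z : Int => z) false := by
            have e1 := PySem.List.sorted_eq_sorted_of_perm (x :: (t₁ ++ m :: q₂))
              (m :: (t₁ ++ x :: q₂)) (fun z : Int => z) (fun a b h => h) hperm
            rw [e1, hscons2] at hs
            exact ((List.cons_eq_cons.1 hs).2).symm
          have hposOK : PosOK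
              ((pos.insert x ((pre.length + (t₁.length + 1) : Nat) : Int)).insert m (pre.length : Int))
              (pre ++ m :: (t₁ ++ x :: q₂)) := by
            intro v hv
            rw [PySem.Dict.getD_insert, PySem.Dict.getD_insert]
            by_cases hvm : v = m
            · rw [if_pos hvm, hvm]
              rw [List.idxOf_append_of_notMem hmpre, List.idxOf_cons_self]
              push_cast
              ring
            · rw [if_neg hvm]
              by_cases hvx : v = x
              · rw [if_pos hvx, hvx]
                rw [List.idxOf_append_of_notMem hxpre,
                  List.idxOf_cons_ne _ (fun h => hxm h.symm),
                  List.idxOf_append_of_notMem hxt₁, List.idxOf_cons_self]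
              · rw [if_neg hvx]
                have hvmem : v ∈ pre ++ x :: (t₁ ++ m :: q₂) := hpermfull.mem_iff.2 hv
                rw [hpos v hvmem]
                congr 1
                rcases List.mem_append.1 hv with hvpre | hvtail
                · rw [List.idxOf_append_of_mem hvpre, List.idxOf_append_of_mem hvpre]
                · have hvt2 : v ∈ t₁ ++ x :: q₂ := (List.mem_cons.1 hvtail).resolve_left hvm
                  rcases List.mem_append.1 hvt2 with hvt₁ | hvxq₂
                  · have hvq : v ∈ x :: (t₁ ++ m :: q₂) :=
                      List.mem_cons_of_mem _ (List.mem_append_left _ hvt₁)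
                    have hvpre' : v ∉ pre := fun h => hdisj v h hvq
                    rw [List.idxOf_append_of_notMem hvpre', List.idxOf_append_of_notMem hvpre']
                    rw [List.idxOf_cons_ne _ (fun h => hvm h.symm),
                      List.idxOf_cons_ne _ (fun h => hvx h.symm)]
                    rw [List.idxOf_append_of_mem hvt₁, List.idxOf_append_of_mem hvt₁]
                  · have hvq₂ : v ∈ q₂ := (List.mem_cons.1 hvxq₂).resolve_left hvx
                    have hvq : v ∈ x :: (t₁ ++ m :: q₂) :=
                      List.mem_cons_of_mem _
                        (List.mem_append_right _ (List.mem_cons_of_mem _ hvq₂))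
                    have hvpre' : v ∉ pre := fun h => hdisj v h hvq
                    have hvt₁ : v ∉ t₁ := fun h => ht₁q₂ v h hvq₂
                    rw [List.idxOf_append_of_notMem hvpre', List.idxOf_append_of_notMem hvpre']
                    rw [List.idxOf_cons_ne _ (fun h => hvm h.symm),
                      List.idxOf_cons_ne _ (fun h => hvx h.symm)]
                    rw [List.idxOf_append_of_notMem hvt₁, List.idxOf_append_of_notMem hvt₁]
                    rw [List.idxOf_cons_ne _ (fun h => hvx h.symm),
                      List.idxOf_cons_ne _ (fun h => hvm h.symm)]
          -- induction hypothesis on the strictly shorter suffix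
          have hlen2 : (t₁ ++ x :: q₂).length = n - 1 := by
            simp only [List.length_cons, List.length_append] at hn ⊢; omega
          have hn1 : 1 ≤ n := by
            simp only [List.length_cons, List.length_append] at hn; omega
          have harr2 : pre ++ m :: (t₁ ++ x :: q₂) = (pre ++ [m]) ++ (t₁ ++ x :: q₂) := by simp
          have IH := ih (n - 1) (by omega) (t₁ ++ x :: q₂) (pre ++ [m]) _ (c + 1) hlen2
            (by rw [← harr2]; exact hnd2) (by rw [← harr2]; exact hposOK)
          have hlen' : ((pre ++ [m]).length : Int) = (pre.length : Int) + 1 := by simp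
          rw [← harr2, ← hs2, hlen'] at IH
          rw [hA]
          refine ⟨IH.1.trans ?_, IH.2⟩
          simp

theorem posInit (p : List Int) (h : p.Nodup) :
    PosOK ((PySem.List.enumerate p 0).foldl (fun d iv => d.insert iv.2 iv.1) PySem.Dict.empty) p := by
  intro v hv
  rw [foldInsert_mem p 0 _ v h hv]
  ring

-- ===== VERDICT (by name: the statement is the Claim_ definition above) =====
theorem count_transpositions_spec : Claim_equal_count_transpositions := by
  intro p c _ hpre
  unfold Spec_count_transpositions count_transpositions_alt
  have h := main_loop p.length p [] _ c rfl (by simpa using hpre) (by simpa using posInit p hpre)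
  simp only [List.nil_append, List.length_nil, Nat.cast_zero] at h
  exact Prod.ext h.1.symm h.2.symm
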